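-- pv_equiv track=rewrite | github.com/EmberEon/TornadoTest | models/base_orm.py | __double_check
-- ===== SOURCE A (Python) =====
-- def __double_check(sql: str, update_fields: list, add_fields: list, form_arr: list):
--     if update_fields or add_fields:
--         sql += " ON DUPLICATE KEY UPDATE "
--         update_str = ""
--         for item in update_fields or []:
--             if item not in form_arr:
--                 raise Exception('Error: SQL INSERT OR UPDATE参数错误: 没有可更新的表单')
--             update_str += "{0}=VALUES({0}),".format(item)
--         sql += update_str if add_fields else update_str[0:-1]
--         add_str = ""
--         for item in add_fields or []:
--             if item not in form_arr:
--                 raise Exception('Error: SQL INSERT OR UPDATE参数错误: 没有可更新的表单')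
--             add_str += "{0}={0}+VALUES({0}),".format(item)
--         sql += add_str[0:-1]
--     return sql
-- ===== SOURCE B (Python) =====
-- def __double_check(sql: str, update_fields: list, add_fields: list, form_arr: list):
--     if not update_fields and not add_fields:
--         return sql
--     allowed = set(form_arr)
--     if any(item not in allowed for item in (update_fields or []) + (add_fields or [])):
--         raise Exception('Error: SQL INSERT OR UPDATE参数错误: 没有可更新的表单')
--     parts = ["{0}=VALUES({0})".format(i) for i in (update_fields or [])]
--     parts += ["{0}={0}+VALUES({0})".format(i) for i in (add_fields or [])]
--     return sql + " ON DUPLICATE KEY UPDATE " + ",".join(parts)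
-- ===== Notes on version B (the rewrite author's own statement) =====
-- stated objective: alternative
-- what changed: B validates all fields in one pass against a set built from form_arr and assembles the clause with a single ','.join over per-field fragments, instead of A's two accumulator loops with per-item list membership scans and trailing-comma slicing.
import Mathlib
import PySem

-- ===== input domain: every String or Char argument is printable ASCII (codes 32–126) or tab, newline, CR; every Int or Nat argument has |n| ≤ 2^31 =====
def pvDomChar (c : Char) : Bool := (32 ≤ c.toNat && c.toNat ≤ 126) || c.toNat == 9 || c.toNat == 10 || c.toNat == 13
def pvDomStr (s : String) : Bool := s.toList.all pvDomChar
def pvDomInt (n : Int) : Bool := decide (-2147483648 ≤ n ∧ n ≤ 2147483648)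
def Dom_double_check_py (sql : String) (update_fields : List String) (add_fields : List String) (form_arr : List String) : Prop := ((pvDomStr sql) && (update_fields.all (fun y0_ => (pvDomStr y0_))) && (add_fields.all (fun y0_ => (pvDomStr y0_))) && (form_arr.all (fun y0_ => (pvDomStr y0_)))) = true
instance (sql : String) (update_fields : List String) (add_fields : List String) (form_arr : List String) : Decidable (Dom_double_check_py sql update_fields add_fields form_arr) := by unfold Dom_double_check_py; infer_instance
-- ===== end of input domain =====

-- B replaces A's two accumulator loops (per-item membership checks in form_arr, trailing-comma
-- slicing) by one set-based validation pass and a single ",".join of per-field fragments (objective: alternative).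

-- ===== PORT A =====
-- first loop: 'for item in update_fields: if item not in form_arr: raise …; update_str += "{0}=VALUES({0}),"'
-- Option state: none = the Exception was raised (those inputs are outside Pre_)
def dcA_upd (update_fields : List String) (form_arr : List String) : Option String :=
  update_fields.foldl
    (fun acc item => acc.bind (fun s =>
      if form_arr.contains item then some (s ++ item ++ "=VALUES(" ++ item ++ "),") else none))
    (some "")

def dcA_add (add_fields : List String) (form_arr : List String) : Option String :=
  add_fields.foldl
    (fun acc item => acc.bind (fun s =>
      if form_arr.contains item then some (s ++ item ++ "=" ++ item ++ "+VALUES(" ++ item ++ "),") else none))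
    (some "")

def double_check_py (sql : String) (update_fields : List String) (add_fields : List String) (form_arr : List String) : String :=
  if update_fields.isEmpty && add_fields.isEmpty then sql
  else
    let sql1 := sql ++ " ON DUPLICATE KEY UPDATE "
    match dcA_upd update_fields form_arr with
    | none => sql
    | some update_str =>
      let sql2 := sql1 ++ (if !add_fields.isEmpty then update_str
                           else PySem.Str.slice update_str (some 0) (some (-1)))
      match dcA_add add_fields form_arr with
      | none => sql
      | some add_str => sql2 ++ PySem.Str.slice add_str (some 0) (some (-1))

def double_check_py_alt (sql : String) (update_fields : List String) (add_fields : List String) (form_arr : List String) : String :=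
  if update_fields.isEmpty && add_fields.isEmpty then sql
  else
    let allowed : PySem.Set String := PySem.Set.ofList form_arr
    if (update_fields ++ add_fields).all (fun item => PySem.Set.contains allowed item) then
      let parts := update_fields.map (fun i => i ++ "=VALUES(" ++ i ++ ")")
                   ++ add_fields.map (fun i => i ++ "=" ++ i ++ "+VALUES(" ++ i ++ ")")
      sql ++ " ON DUPLICATE KEY UPDATE " ++ PySem.Str.join "," parts
    else sql


-- ===== PRECONDITION & SPEC =====
-- Pre_ excludes exactly the inputs on which A raises its Exception: some field of update_fields
-- or add_fields is missing from form_arr (B raises there too).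
def Pre_double_check_py (sql : String) (update_fields : List String) (add_fields : List String) (form_arr : List String) : Prop :=
  (∀ x ∈ update_fields, x ∈ form_arr) ∧ (∀ x ∈ add_fields, x ∈ form_arr)
instance (sql : String) (update_fields : List String) (add_fields : List String) (form_arr : List String) : Decidable (Pre_double_check_py sql update_fields add_fields form_arr) := by unfold Pre_double_check_py; infer_instance

def pvWitness_double_check_py : String × List String × List String × List String :=
  ("INSERT INTO t (a,b) VALUES (%s,%s)", ["a"], ["b"], ["a", "b", "c"])

def Spec_double_check_py (sql : String) (update_fields : List String) (add_fields : List String) (form_arr : List String) (out : String) : Prop := out = double_check_py_alt sql update_fields add_fields form_arr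
instance (sql : String) (update_fields : List String) (add_fields : List String) (form_arr : List String) (out : String) : Decidable (Spec_double_check_py sql update_fields add_fields form_arr out) := by unfold Spec_double_check_py; infer_instance

-- ===== CLAIM (what is proved, stated in full; the proofs are below) =====
def Claim_equal_double_check_py : Prop := ∀ (sql : String) (update_fields : List String) (add_fields : List String) (form_arr : List String), Dom_double_check_py sql update_fields add_fields form_arr → Pre_double_check_py sql update_fields add_fields form_arr → Spec_double_check_py sql update_fields add_fields form_arr (double_check_py sql update_fields add_fields form_arr)

-- ===== LEMMAS AND PROOFS =====

theorem flatten_comma_dropLast (ps : List (List Char)) (h : ps ≠ []) :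
    ((ps.map (fun p => p ++ [','])).flatten).dropLast = List.intercalate [','] ps := by
  induction ps with
  | nil => simp at h
  | cons p t ih =>
    cases t with
    | nil => simp [List.intercalate]
    | cons q r =>
      have hne : (List.map (fun p => p ++ [',']) (q :: r)).flatten ≠ [] := by simp
      rw [List.map_cons, List.flatten_cons, List.dropLast_append_of_ne_nil hne, ih (by simp)]
      simp [List.intercalate, List.intersperse]

theorem dcA_loop_eq {F : String → String → String} {G : String → List Char}
    (hF : ∀ t i, (F t i).toList = t.toList ++ G i ++ [','])
    (form_arr : List String) (u : List String) (h : ∀ x ∈ u, x ∈ form_arr) (s : String) :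
    u.foldl (fun acc item => acc.bind (fun t =>
        if form_arr.contains item then some (F t item) else none)) (some s)
      = some (String.ofList (s.toList ++ ((u.map G).map (fun g => g ++ [','])).flatten)) := by
  induction u generalizing s with
  | nil => simp [String.ofList]
  | cons i t ih =>
    have hi : form_arr.contains i = true := by
      simpa using h i (List.mem_cons_self ..)
    rw [List.foldl_cons, Option.bind_some, if_pos hi,
      ih (fun x hx => h x (List.mem_cons_of_mem _ hx))]
    congr 1
    apply String.toList_inj.mp
    simp [hF]

theorem dcA_upd_eq (form_arr u : List String) (h : ∀ x ∈ u, x ∈ form_arr) :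
    dcA_upd u form_arr = some (String.ofList
      (((u.map (fun i => (i ++ "=VALUES(" ++ i ++ ")").toList)).map (fun g => g ++ [','])).flatten)) := by
  unfold dcA_upd
  rw [dcA_loop_eq (G := fun i => (i ++ "=VALUES(" ++ i ++ ")").toList)
    (fun t i => by simp) form_arr u h ""]
  simp

theorem dcA_add_eq (form_arr a : List String) (h : ∀ x ∈ a, x ∈ form_arr) :
    dcA_add a form_arr = some (String.ofList
      (((a.map (fun i => (i ++ "=" ++ i ++ "+VALUES(" ++ i ++ ")").toList)).map (fun g => g ++ [','])).flatten)) := by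
  unfold dcA_add
  rw [dcA_loop_eq (G := fun i => (i ++ "=" ++ i ++ "+VALUES(" ++ i ++ ")").toList)
    (fun t i => by simp) form_arr a h ""]
  simp

theorem flatten_comma_append_dropLast (ps qs : List (List Char)) (h : qs ≠ []) :
    (ps.map (fun p => p ++ [','])).flatten ++ ((qs.map (fun p => p ++ [','])).flatten).dropLast
      = List.intercalate [','] (ps ++ qs) := by
  have hne : (qs.map (fun p => p ++ [','])).flatten ≠ [] := by
    cases qs with
    | nil => exact absurd rfl h
    | cons q r => simp
  rw [← List.dropLast_append_of_ne_nil hne, ← List.flatten_append, ← List.map_append,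
    flatten_comma_dropLast _ (by simp [h])]

theorem comma_dropLast_map {α : Type} (G : α → List Char) (l : List α) (h : l ≠ []) :
    ((l.map ((fun g => g ++ [',']) ∘ G)).flatten).dropLast = List.intercalate [','] (l.map G) := by
  rw [← List.map_map, flatten_comma_dropLast _ (by simp [h])]

theorem comma_append_dropLast_map {α : Type} (G G' : α → List Char) (l m : List α) (h : m ≠ []) :
    (l.map ((fun g => g ++ [',']) ∘ G)).flatten ++ ((m.map ((fun g => g ++ [',']) ∘ G')).flatten).dropLast
      = List.intercalate [','] (l.map G ++ m.map G') := by
  rw [← List.map_map, ← List.map_map, flatten_comma_append_dropLast _ _ (by simp [h])]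

theorem slice01_toList (s : String) :
    (PySem.Str.slice s (some 0) (some (-1))).toList = s.toList.dropLast := by
  simp [PySem.Str.slice, PySem.List.slice_zero_start, PySem.List.slice_to_neg_one]

theorem join_comma_toList (ps : List String) :
    (PySem.Str.join "," ps).toList = List.intercalate [','] (ps.map String.toList) := by
  simp [PySem.Str.join, PySem.Chars.join]


-- ===== VERDICT (by name: the statement is the Claim_ definition above) =====
theorem double_check_py_spec : Claim_equal_double_check_py := by
  intro sql u a f _ hpre
  obtain ⟨h1, h2⟩ := hpre
  unfold Spec_double_check_py
  unfold double_check_py double_check_py_alt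
  have hall : ((u ++ a).all (fun item => PySem.Set.contains (PySem.Set.ofList f) item)) = true := by
    simp only [List.all_eq_true, List.mem_append]
    rintro x (hx | hx)
    · simpa [PySem.Set.contains] using (PySem.Set.mem_ofList f x).mpr (h1 x hx)
    · simpa [PySem.Set.contains] using (PySem.Set.mem_ofList f x).mpr (h2 x hx)
  rw [dcA_upd_eq f u h1, dcA_add_eq f a h2]
  by_cases hu : u = [] <;> by_cases ha : a = []
  · simp [hu, ha]
  · subst hu
    have hane : (!a.isEmpty) = true := by simp [ha]
    have hcond : ((List.isEmpty ([] : List String)) && a.isEmpty) = false := by simp [ha]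
    have hall2 : (a.all (fun item => PySem.Set.contains (PySem.Set.ofList f) item)) = true := by
      simpa using hall
    simp only [hall2, hcond, Bool.false_eq_true, if_false, List.nil_append, if_true, hane,
      List.map_nil, List.flatten_nil]
    apply String.toList_inj.mp
    simp only [String.toList_append, String.toList_ofList, slice01_toList, join_comma_toList,
      List.map_map, List.nil_append, List.append_assoc]
    rw [comma_dropLast_map _ _ ha]
    simp [Function.comp_def]
  · subst ha
    have hcond : u.isEmpty = false := by simp [hu]
    have hall2 : (u.all (fun item => PySem.Set.contains (PySem.Set.ofList f) item)) = true := by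
      simpa using hall
    simp only [hall2, List.isEmpty_nil, Bool.and_true, hcond, Bool.false_eq_true, if_false,
      List.append_nil, if_true, Bool.not_true, List.map_nil, List.flatten_nil]
    apply String.toList_inj.mp
    simp only [String.toList_append, String.toList_ofList, slice01_toList, join_comma_toList,
      List.map_map, List.append_nil, List.dropLast_nil, List.append_assoc]
    rw [comma_dropLast_map _ _ hu]
    simp [Function.comp_def]
  · have hcond : (u.isEmpty && a.isEmpty) = false := by simp [hu]
    have hane : (!a.isEmpty) = true := by simp [ha]
    simp only [hcond, Bool.false_eq_true, if_false, hall, if_true, hane]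
    apply String.toList_inj.mp
    simp only [String.toList_append, String.toList_ofList, slice01_toList, join_comma_toList,
      List.map_map, List.map_append, List.append_assoc]
    rw [comma_append_dropLast_map _ _ _ _ ha]
    simp [Function.comp_def]
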